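-- pv_equiv track=rewrite | github.com/hucovic-vladimir/IPP_Interpreter | interpreter.py | _replaceEscapeSequences
-- ===== SOURCE A (Python) =====
-- def _replaceEscapeSequences(string):
--     outputString = ""
--     i = 0
--     while i < len(string):
--         if(string[i] == '\\'):
--             asciiCode = int(string[i+1:i+4])
--             outputString += chr(asciiCode)
--             i += 3
--         else:
--             outputString += string[i]
--         i += 1
--     return outputString
-- ===== SOURCE B (Python) =====
-- def _replaceEscapeSequences(string):
--     parts = []
--     pos = 0
--     while True:
--         idx = string.find('\\', pos)
--         if idx == -1:
--             parts.append(string[pos:])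
--             break
--         parts.append(string[pos:idx])
--         parts.append(chr(int(string[idx + 1:idx + 4])))
--         pos = idx + 4
--     return ''.join(parts)
-- ===== Notes on version B (the rewrite author's own statement) =====
-- stated objective: faster
-- what changed: Replaces A's per-character index loop with string += by a find-driven chunk loop: str.find of the next backslash jumps to the next escape, literal runs are appended as whole slices and a single str.join builds the result once.
import Mathlib
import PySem

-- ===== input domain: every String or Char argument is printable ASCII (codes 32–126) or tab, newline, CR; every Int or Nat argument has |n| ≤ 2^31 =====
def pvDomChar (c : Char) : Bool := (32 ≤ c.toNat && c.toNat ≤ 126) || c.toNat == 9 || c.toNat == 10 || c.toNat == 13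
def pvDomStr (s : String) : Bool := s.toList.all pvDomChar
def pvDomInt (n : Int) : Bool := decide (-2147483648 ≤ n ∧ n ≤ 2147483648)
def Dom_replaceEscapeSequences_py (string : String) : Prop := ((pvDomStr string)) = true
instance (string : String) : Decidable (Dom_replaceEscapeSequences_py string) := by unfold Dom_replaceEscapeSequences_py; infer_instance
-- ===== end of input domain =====

-- B replaces A's per-character index scan by a find-driven chunk loop (str.find + slicing + join);
-- same 3-char escape windows, so both raise on exactly the same inputs (those are outside Pre_).

-- ===== PORT A =====
-- A's while loop: index i, `outputString +=`; `none` marks the inputs where the Python raises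
-- (int() ValueError on a bad window, chr() ValueError on an out-of-range code).
def pvALoop (cs : List Char) (i : Nat) (out : List Char) : Option (List Char) :=
  if h : i < cs.length then
    if cs[i] = '\\' then
      match PySem.Int.ofChars? (PySem.List.slice cs (some ((i : Int) + 1)) (some ((i : Int) + 4))) with
      | none => none
      | some code =>
        if 0 ≤ code ∧ code < 1114112 then
          pvALoop cs (i + 4) (out ++ [Char.ofNat code.toNat])
        else none
    else pvALoop cs (i + 1) (out ++ [cs[i]])
  else some out
termination_by cs.length - i

def replaceEscapeSequences_py (string : String) : String :=
  match pvALoop string.toList 0 [] with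
  | some out => String.ofList out
  | none => ""    -- the Python raises here; excluded by Pre_

-- ===== PORT B =====
lemma pv_singleton_prefix (a : Char) (l : List Char) : [a] <+: l ↔ l[0]? = some a := by
  cases l with
  | nil => simp
  | cons x xs =>
    constructor
    · rintro ⟨t, ht⟩
      simp only [List.singleton_append, List.cons.injEq] at ht
      simp [ht.1]
    · intro h
      simp only [List.getElem?_cons_zero, Option.some.injEq] at h
      exact ⟨xs, by simp [h]⟩

-- facts about string.find('\\', pos) the recursion in pvBLoop needs for termination
lemma pvFF_facts (cs : List Char) (pos : Nat)
    (h : PySem.Chars.findFrom cs ['\\'] (pos : Int) none ≠ -1) :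
    (pos : Int) ≤ PySem.Chars.findFrom cs ['\\'] (pos : Int) none ∧
    (PySem.Chars.findFrom cs ['\\'] (pos : Int) none).toNat < cs.length ∧
    cs[(PySem.Chars.findFrom cs ['\\'] (pos : Int) none).toNat]? = some '\\' ∧
    ∀ t : Nat, pos ≤ t → t < (PySem.Chars.findFrom cs ['\\'] (pos : Int) none).toNat →
      cs[t]? ≠ some '\\' := by
  have hle : pos ≤ cs.length := by
    by_contra hp
    apply h
    simp only [PySem.Chars.findFrom]
    rw [if_neg (by omega : ¬ ((pos : Int) < 0))]
    rw [if_pos (by omega : ((cs.length : Int)) < ((pos : Int)))]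
  rw [PySem.Chars.findFrom_natCast cs ['\\'] pos hle] at h ⊢
  set r := PySem.Chars.find (cs.drop pos) ['\\'] with hr
  by_cases hneg : r = -1
  · simp [hneg] at h
  · rw [if_neg hneg] at h ⊢
    have hr0 : 0 ≤ r := by
      have := PySem.Chars.neg_one_le_find (cs.drop pos) ['\\']
      rw [← hr] at this; omega
    obtain ⟨hpre, hmin⟩ := PySem.Chars.find_spec (s := cs.drop pos) (sub := ['\\']) (by rw [← hr]; exact hr0)
    rw [← hr] at hpre hmin
    rw [pv_singleton_prefix] at hpre
    rw [List.getElem?_drop, List.getElem?_drop] at hpre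
    rw [(by omega : r.toNat + 0 = r.toNat)] at hpre
    have hlt : pos + r.toNat < cs.length := by
      obtain ⟨hh, -⟩ := List.getElem?_eq_some_iff.mp hpre
      omega
    have htn : ((pos : Int) + r).toNat = pos + r.toNat := by omega
    refine ⟨by omega, by rw [htn]; omega, by rw [htn]; exact hpre, ?_⟩
    intro t h1 h2 hc
    rw [htn] at h2
    have := hmin (t - pos) (by omega)
    rw [pv_singleton_prefix, List.getElem?_drop, List.getElem?_drop] at this
    rw [(by omega : pos + (t - pos + 0) = t)] at this
    exact this hc

-- B's loop: jump from backslash to backslash with find, collect chunks, join at the end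
def pvBLoop (cs : List Char) (pos : Nat) (parts : List (List Char)) : Option (List (List Char)) :=
  let idx := PySem.Chars.findFrom cs ['\\'] (pos : Int) none
  if hidx : idx = -1 then some (parts ++ [cs.drop pos])    -- string[pos:]
  else
    match PySem.Int.ofChars? (PySem.List.slice cs (some (idx + 1)) (some (idx + 4))) with
    | none => none
    | some code =>
      if 0 ≤ code ∧ code < 1114112 then
        pvBLoop cs (idx.toNat + 4)
          (parts ++ [PySem.List.slice cs (some (pos : Int)) (some idx), [Char.ofNat code.toNat]])
      else none
termination_by cs.length - pos
decreasing_by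
  have := pvFF_facts cs pos hidx
  omega

def replaceEscapeSequences_py_alt (string : String) : String :=
  match pvBLoop string.toList 0 [] with
  | some parts => String.ofList parts.flatten    -- str.join with the empty separator is flatten (exact)
  | none => ""    -- the Python raises here; excluded by Pre_

-- ===== PRECONDITION & SPEC =====
-- Pre_: every backslash is followed by a window string[i+1:i+4] that int() parses to a chr()-valid
-- code — exactly the inputs on which the Python A returns (any backslash inside a window makes
-- that window unparsable, so the quantification over ALL backslash positions is exact).
def Pre_replaceEscapeSequences_py (string : String) : Prop :=
  ∀ i ∈ List.range string.toList.length,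
    string.toList[i]? = some '\\' →
      ((PySem.Int.ofChars? (PySem.List.slice string.toList
          (some ((i : Int) + 1)) (some ((i : Int) + 4)))).any
        (fun c => decide (0 ≤ c ∧ c < 1114112))) = true
instance (string : String) : Decidable (Pre_replaceEscapeSequences_py string) := by
  unfold Pre_replaceEscapeSequences_py; infer_instance

def pvWitness_replaceEscapeSequences_py : String := "a\\065b"

def Spec_replaceEscapeSequences_py (string : String) (out : String) : Prop :=
  out = replaceEscapeSequences_py_alt string
instance (string : String) (out : String) : Decidable (Spec_replaceEscapeSequences_py string out) := by
  unfold Spec_replaceEscapeSequences_py; infer_instance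

-- ===== CLAIM (what is proved, stated in full; the proofs are below) =====
def Claim_equal_replaceEscapeSequences_py : Prop := ∀ (string : String), Dom_replaceEscapeSequences_py string → Pre_replaceEscapeSequences_py string → Spec_replaceEscapeSequences_py string (replaceEscapeSequences_py string)

-- ===== LEMMAS AND PROOFS =====

-- no backslash on positions [pos, pos+…) → ff = -1 means none up to the end
lemma pvFF_none (cs : List Char) (pos : Nat)
    (h : PySem.Chars.findFrom cs ['\\'] (pos : Int) none = -1) :
    ∀ t : Nat, pos ≤ t → t < cs.length → cs[t]? ≠ some '\\' := by
  intro t h1 h2 hc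
  have hle : pos ≤ cs.length := by omega
  rw [PySem.Chars.findFrom_natCast_eq_neg_one_iff cs ['\\'] pos hle] at h
  apply h
  have hpre : ['\\'] <+: (cs.drop pos).drop (t - pos) := by
    rw [pv_singleton_prefix, List.getElem?_drop, List.getElem?_drop,
      (by omega : pos + (t - pos + 0) = t)]
    exact hc
  exact hpre.isInfix.trans (List.drop_suffix (t - pos) (cs.drop pos)).isInfix

-- both loops finished: pos at or past the end
lemma pvLoop_eq_end (cs : List Char) (pos : Nat) (parts : List (List Char))
    (h : cs.length ≤ pos) :
    pvALoop cs pos parts.flatten = Option.map List.flatten (pvBLoop cs pos parts) := by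
  rw [pvALoop, dif_neg (by omega : ¬ (pos < cs.length))]
  have hff : PySem.Chars.findFrom cs ['\\'] (pos : Int) none = -1 := by
    by_contra hc
    obtain ⟨a1, a2, -, -⟩ := pvFF_facts cs pos hc
    omega
  rw [pvBLoop]
  simp only [hff, reduceDIte]
  rw [List.drop_eq_nil_of_le h]
  simp

-- A walks a backslash-free run one character at a time
lemma pvALoop_run (cs : List Char) (m : Nat) (hm : m ≤ cs.length) :
    ∀ k pos out, m - pos = k → pos ≤ m →
      (∀ t : Nat, pos ≤ t → t < m → cs[t]? ≠ some '\\') →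
      pvALoop cs pos out = pvALoop cs m (out ++ (cs.drop pos).take (m - pos)) := by
  intro k
  induction k with
  | zero =>
    intro pos out hk hpm hnb
    have hpm' : pos = m := by omega
    subst hpm'
    simp
  | succ k ih =>
    intro pos out hk hpm hnb
    have hpl : pos < m := by omega
    have hplen : pos < cs.length := by omega
    rw [pvALoop, dif_pos hplen]
    have hne : ¬ (cs[pos] = '\\') := by
      have := hnb pos le_rfl hpl
      simpa [List.getElem?_eq_getElem hplen] using this
    rw [if_neg hne]
    rw [ih (pos + 1) (out ++ [cs[pos]]) (by omega) (by omega)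
      (fun t ht1 ht2 => hnb t (by omega) ht2)]
    congr 1
    rw [List.append_assoc]
    congr 1
    rw [(by omega : m - pos = (m - (pos + 1)) + 1), List.drop_eq_getElem_cons hplen,
      List.take_succ_cons, List.singleton_append]

lemma pvLoop_eq (cs : List Char) :
    ∀ k pos parts, cs.length - pos ≤ k →
      pvALoop cs pos parts.flatten = Option.map List.flatten (pvBLoop cs pos parts) := by
  intro k
  induction k with
  | zero =>
    intro pos parts hk
    exact pvLoop_eq_end cs pos parts (by omega)
  | succ k ih =>
    intro pos parts hk
    by_cases hend : cs.length ≤ pos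
    · exact pvLoop_eq_end cs pos parts hend
    by_cases hff : PySem.Chars.findFrom cs ['\\'] (pos : Int) none = -1
    · rw [pvALoop_run cs cs.length le_rfl (cs.length - pos) pos parts.flatten rfl (by omega)
        (pvFF_none cs pos hff)]
      rw [pvALoop, dif_neg (lt_irrefl cs.length)]
      rw [pvBLoop]
      simp only [hff, reduceDIte]
      have : (cs.drop pos).take (cs.length - pos) = cs.drop pos := by
        apply List.take_of_length_le
        simp
      rw [this]
      simp
    · obtain ⟨h1, h2, h3, h4⟩ := pvFF_facts cs pos hff
      set j := (PySem.Chars.findFrom cs ['\\'] (pos : Int) none).toNat with hj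
      have hffj : PySem.Chars.findFrom cs ['\\'] (pos : Int) none = (j : Int) := by omega
      rw [pvALoop_run cs j (le_of_lt h2) (j - pos) pos parts.flatten rfl (by omega) h4]
      rw [pvALoop, dif_pos h2]
      obtain ⟨hjl, hgetj⟩ := List.getElem?_eq_some_iff.mp h3
      rw [if_pos hgetj]
      rw [pvBLoop]
      simp only [hffj]
      rw [dif_neg (by omega : ¬ ((j : Int) = -1))]
      cases hw : PySem.Int.ofChars? (PySem.List.slice cs (some ((j : Int) + 1)) (some ((j : Int) + 4))) with
      | none => simp
      | some code =>
        simp only [Int.toNat_natCast]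
        by_cases hcode : 0 ≤ code ∧ code < 1114112
        · rw [if_pos hcode, if_pos hcode]
          have hrun : PySem.List.slice cs (some ((pos : Nat) : Int)) (some ((j : Nat) : Int)) =
              (cs.drop pos).take (j - pos) := PySem.List.slice_natCast cs pos j
          rw [← ih (j + 4)
            (parts ++ [PySem.List.slice cs (some ((pos : Nat) : Int)) (some ((j : Nat) : Int)),
              [Char.ofNat code.toNat]]) (by omega)]
          congr 1
          simp [hrun]
        · rw [if_neg hcode, if_neg hcode]
          simp

-- ===== VERDICT (by name: the statement is the Claim_ definition above) =====
theorem replaceEscapeSequences_py_spec : Claim_equal_replaceEscapeSequences_py := by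
  intro s _ _
  unfold Spec_replaceEscapeSequences_py replaceEscapeSequences_py replaceEscapeSequences_py_alt
  have h := pvLoop_eq s.toList s.toList.length 0 [] (by omega)
  simp only [List.flatten_nil] at h
  rw [h]
  cases pvBLoop s.toList 0 [] <;> simp [Option.map]
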